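-- pv_equiv track=rewrite | github.com/atkoehler/gts | src/modules/altersource.py | replace_source
-- ===== SOURCE A (Python) =====
-- def replace_source(lines, look_for, replace_with, count = -1):
--     n = 0
--     for (i, line) in enumerate(lines):
--         if count != -1 and n >= count:
--             break
--         if line != line.replace(look_for, replace_with):
--             lines[i] = line.replace(look_for, replace_with)
--             n = n + 1
--
--     if (count == -1 and n > 0) or (count != -1 and n == count):
--         return True
--     else:
--         return False
-- ===== SOURCE B (Python) =====
-- def replace_source(lines, look_for, replace_with, count=-1):
--     changed = [i for i, line in enumerate(lines)
--                if line != line.replace(look_for, replace_with)]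
--     if count == -1:
--         applied = len(changed)
--     elif count > 0:
--         applied = min(count, len(changed))
--     else:
--         applied = 0
--     for i in changed[:applied]:
--         lines[i] = lines[i].replace(look_for, replace_with)
--     return (count == -1 and applied > 0) or (count != -1 and applied == count)
-- ===== Notes on version B (the rewrite author's own statement) =====
-- stated objective: alternative
-- what changed: B separates the work into two phases: first collect the indices of all lines that a replace would change, then compute the number to apply arithmetically (all for count==-1, min(count, found) for count>0, none otherwise) and apply replace only to that prefix, deciding the return value by a closed formula instead of A's single fused loop with an early break and a running counter.
import Mathlib
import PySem

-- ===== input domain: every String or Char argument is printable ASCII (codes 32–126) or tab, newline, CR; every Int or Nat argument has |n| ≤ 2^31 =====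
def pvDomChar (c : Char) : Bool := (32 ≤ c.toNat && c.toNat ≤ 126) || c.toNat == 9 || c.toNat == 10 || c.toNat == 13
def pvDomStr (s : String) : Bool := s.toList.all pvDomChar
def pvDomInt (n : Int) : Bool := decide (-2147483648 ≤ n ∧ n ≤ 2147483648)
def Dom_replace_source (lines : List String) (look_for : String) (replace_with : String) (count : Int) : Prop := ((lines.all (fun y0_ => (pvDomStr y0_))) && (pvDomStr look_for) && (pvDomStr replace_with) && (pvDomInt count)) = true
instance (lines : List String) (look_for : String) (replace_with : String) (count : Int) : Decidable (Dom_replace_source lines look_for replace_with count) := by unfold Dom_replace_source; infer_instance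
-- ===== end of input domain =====

-- B replaces A's single fused loop (early break + running counter) by two phases: collect the
-- indices of changing lines, pick the applicable prefix arithmetically, decide the result by a
-- closed formula (objective: alternative).  A mutates `lines` in place; the equivalence proved
-- here is about the RETURN value only (B performs the same mutation in its Python form).

-- ===== PORT A =====
-- A's for-loop with break: recursion over the remaining lines carrying the counter n.
def replace_source_loop (rest : List String) (look_for replace_with : String) (count n : Int) : Int :=
  match rest with
  | [] => n
  | line :: rest' =>
    if count ≠ -1 ∧ n ≥ count then n
    else if line ≠ PySem.Str.replace line look_for replace_with then
      replace_source_loop rest' look_for replace_with count (n + 1)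
    else
      replace_source_loop rest' look_for replace_with count n

def replace_source (lines : List String) (look_for : String) (replace_with : String) (count : Int) : Bool :=
  let n := replace_source_loop lines look_for replace_with count 0
  if (count = -1 ∧ n > 0) ∨ (count ≠ -1 ∧ n = count) then true else false

-- ===== PORT B =====
def replace_source_alt (lines : List String) (look_for : String) (replace_with : String) (count : Int) : Bool :=
  let changed := ((PySem.List.enumerate lines).filter
      (fun p => p.2 ≠ PySem.Str.replace p.2 look_for replace_with)).map (·.1)
  let applied : Int :=
    if count = -1 then (changed.length : Int)
    else if count > 0 then min count (changed.length : Int)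
    else 0
  decide ((count = -1 ∧ applied > 0) ∨ (count ≠ -1 ∧ applied = count))

-- ===== PRECONDITION & SPEC =====
def Spec_replace_source (lines : List String) (look_for : String) (replace_with : String) (count : Int) (out : Bool) : Prop := out = replace_source_alt lines look_for replace_with count
instance (lines : List String) (look_for : String) (replace_with : String) (count : Int) (out : Bool) : Decidable (Spec_replace_source lines look_for replace_with count out) := by unfold Spec_replace_source; infer_instance

-- ===== CLAIM (what is proved, stated in full; the proofs are below) =====
def Claim_equal_replace_source : Prop := ∀ (lines : List String) (look_for : String) (replace_with : String) (count : Int), Dom_replace_source lines look_for replace_with count → Spec_replace_source lines look_for replace_with count (replace_source lines look_for replace_with count)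

-- ===== LEMMAS AND PROOFS =====

-- the number of lines a replace would change, as B counts them
def pvChanged (rest : List String) (look_for replace_with : String) : Int :=
  ((rest.filter (fun l => l ≠ PySem.Str.replace l look_for replace_with)).length : Int)

theorem pvChanged_nonneg (rest : List String) (lf rw : String) : 0 ≤ pvChanged rest lf rw := by
  simp [pvChanged]

theorem pvChanged_nil (lf rw : String) : pvChanged [] lf rw = 0 := by
  simp [pvChanged]

theorem pvChanged_cons (l : String) (rest : List String) (lf rw : String) :
    pvChanged (l :: rest) lf rw =
      (if l ≠ PySem.Str.replace l lf rw then 1 else 0) + pvChanged rest lf rw := by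
  unfold pvChanged
  rw [List.filter_cons]
  simp only [ne_eq, decide_not]
  cases hb : decide (l = PySem.Str.replace l lf rw) with
  | false =>
    simp only [Bool.not_false]
    rw [if_pos trivial, if_pos (of_decide_eq_false hb), List.length_cons]
    push_cast; omega
  | true =>
    simp only [Bool.not_true, Bool.false_eq_true, if_false]
    rw [if_neg (not_not_intro (of_decide_eq_true hb))]
    omega

theorem pvChanged_cons_eq (l : String) (rest : List String) (lf rw : String)
    (h : l = PySem.Str.replace l lf rw) :
    pvChanged (l :: rest) lf rw = pvChanged rest lf rw := by
  rw [pvChanged_cons, if_neg (not_not_intro h)]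
  omega

theorem pvChanged_cons_ne (l : String) (rest : List String) (lf rw : String)
    (h : l ≠ PySem.Str.replace l lf rw) :
    pvChanged (l :: rest) lf rw = 1 + pvChanged rest lf rw := by
  rw [pvChanged_cons, if_pos h]

-- B's changed-index count equals the direct count of changing lines
theorem pvEnumCount (lines : List String) (lf rw : String) :
    ((((PySem.List.enumerate lines).filter
        (fun p => p.2 ≠ PySem.Str.replace p.2 lf rw)).map (·.1)).length : Int)
      = pvChanged lines lf rw := by
  unfold pvChanged
  congr 1
  rw [List.length_map, ← List.countP_eq_length_filter, ← List.countP_eq_length_filter]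
  conv_rhs => rw [← PySem.List.map_snd_enumerate (xs := lines) (s := 0)]
  rw [List.countP_map]
  rfl

-- (if p then true else false) = decide p, used to align A's return shape with B's
theorem pvIf_decide (p : Prop) [Decidable p] : (if p then true else false) = decide p := by
  by_cases h : p
  · rw [if_pos h, decide_eq_true h]
  · rw [if_neg h, decide_eq_false h]

-- A's loop when count = -1: never breaks, counts every changing line
theorem loop_neg_one (rest : List String) (lf rw : String) :
    ∀ n : Int, replace_source_loop rest lf rw (-1) n = n + pvChanged rest lf rw := by
  induction rest with
  | nil => intro n; rw [pvChanged_nil]; simp [replace_source_loop]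
  | cons l rest' ih =>
    intro n
    simp only [replace_source_loop]
    rw [if_neg (fun hc => hc.1 rfl)]
    by_cases h : l = PySem.Str.replace l lf rw
    · rw [if_neg (not_not_intro h), ih n, pvChanged_cons_eq _ _ _ _ h]
    · rw [if_pos h, ih (n + 1), pvChanged_cons_ne _ _ _ _ h]
      omega

-- A's loop when count ≥ 0 and 0 ≤ n ≤ count: it stops at count
theorem loop_min (rest : List String) (lf rw : String) (count : Int) (hc : 0 ≤ count) :
    ∀ n : Int, 0 ≤ n → n ≤ count →
      replace_source_loop rest lf rw count n = min count (n + pvChanged rest lf rw) := by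
  induction rest with
  | nil =>
    intro n _ hn2
    rw [pvChanged_nil]
    simp [replace_source_loop]
    omega
  | cons l rest' ih =>
    intro n hn1 hn2
    simp only [replace_source_loop]
    by_cases hb : n ≥ count
    · rw [if_pos ⟨by omega, hb⟩]
      have h0 := pvChanged_nonneg (l :: rest') lf rw
      omega
    · rw [if_neg (fun hcn => hb hcn.2)]
      by_cases h : l = PySem.Str.replace l lf rw
      · rw [if_neg (not_not_intro h), ih n hn1 hn2, pvChanged_cons_eq _ _ _ _ h]
      · rw [if_pos h, ih (n + 1) (by omega) (by omega), pvChanged_cons_ne _ _ _ _ h]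
        omega

-- A's loop when count < -1: breaks immediately
theorem loop_small (rest : List String) (lf rw : String) (count : Int) (hc : count < -1) :
    replace_source_loop rest lf rw count 0 = 0 := by
  cases rest with
  | nil => simp [replace_source_loop]
  | cons l rest' =>
    simp only [replace_source_loop]
    rw [if_pos ⟨by omega, by omega⟩]

-- ===== VERDICT (by name: the statement is the Claim_ definition above) =====
theorem replace_source_spec : Claim_equal_replace_source := by
  unfold Claim_equal_replace_source
  intro lines lf rw count _
  unfold Spec_replace_source replace_source replace_source_alt
  simp only []
  rw [pvEnumCount, pvIf_decide]
  have hch := pvChanged_nonneg lines lf rw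
  rcases lt_trichotomy count (-1) with hc | hc | hc
  · rw [loop_small lines lf rw count hc,
      if_neg (show count ≠ -1 by omega), if_neg (show ¬count > 0 by omega)]
  · subst hc
    rw [loop_neg_one lines lf rw 0, if_pos rfl]
    exact decide_eq_decide.mpr (by omega)
  · have hc0 : 0 ≤ count := by omega
    rw [loop_min lines lf rw count hc0 0 le_rfl hc0,
      if_neg (show count ≠ -1 by omega)]
    by_cases hz : count > 0
    · rw [if_pos hz]
      exact decide_eq_decide.mpr (by omega)
    · rw [if_neg hz]
      exact decide_eq_decide.mpr (by omega)
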